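-- pv_equiv track=rewrite | github.com/Tom-top/fiber_photometry_analysis | fiber_photometry_analysis/photo_funcs.py | detect_major_bouts
-- ===== SOURCE A (Python) =====
-- def detect_major_bouts(events, DBE, BL, GD):
--     major_events_positions = []
--     major_events_lengths = []
--     seeds_positions = []
--
--     new_bout_detected = False
--     new_major_bout_detected = False
--
--     pos_potential_event = 0
--
--     distance_to_next_event = 0
--     cumulative_events = 0
--
--     for pos, event in enumerate(events):
--         if event:
--             cumulative_events += 1
--             if not new_bout_detected:
--                 new_bout_detected = True
--                 pos_potential_event = pos
--                 seeds_positions.append(pos)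
--             elif new_bout_detected:
--                 distance_to_next_event = 0
--                 if cumulative_events >= BL:
--                     if pos_potential_event - GD > 0 and pos_potential_event + GD < len(events):
--                         if not new_major_bout_detected:
--                             new_major_bout_detected = True
--                             major_events_positions.append(pos_potential_event)
--         else:
--             if new_bout_detected:
--                 if distance_to_next_event < DBE:
--                     distance_to_next_event += 1
--                 elif distance_to_next_event >= DBE:
--                     if new_major_bout_detected:
--                         major_events_lengths.append(cumulative_events)
--
--                     distance_to_next_event = 0
--                     new_bout_detected = False
--                     new_major_bout_detected = False
--                     cumulative_events = 0
--
--     major_events = [True if n in major_events_positions else False for n, i in enumerate(events)]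
--     seeds_events = [True if n in seeds_positions else False for n, i in enumerate(events)]
--
--     return major_events, major_events_positions, major_events_lengths, seeds_events, seeds_positions
-- ===== SOURCE B (Python) =====
-- from itertools import groupby
--
-- def detect_major_bouts(events, DBE, BL, GD):
--     n = len(events)
--     # run-length compress the event trace into (value, length, start) runs
--     runs = []
--     i = 0
--     for value, grp in groupby(events):
--         k = sum(1 for _ in grp)
--         runs.append((bool(value), k, i))
--         i += k
--
--     seeds, majors, lengths = [], [], []
--     in_bout = False
--     is_major = False
--     count = 0
--     seed = 0
--     for value, k, s in runs:
--         if value: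
--             if not in_bout:      # the first event only opens the bout and seeds it
--                 in_bout = True
--                 seed = s
--                 seeds.append(s)
--                 count = 1
--                 k -= 1
--             if k:                # the remaining events extend it and can promote it
--                 count += k
--                 if not is_major and count >= BL and 0 < seed - GD and seed + GD < n:
--                     is_major = True
--                     majors.append(seed)
--         elif in_bout and k > DBE:  # a gap longer than DBE closes the bout
--             if is_major:
--                 lengths.append(count)
--             in_bout = False
--             is_major = False
--             count = 0
--
--     major_mask = [False] * n
--     for p in majors:
--         major_mask[p] = True
--     seed_mask = [False] * n
--     for p in seeds:
--         seed_mask[p] = True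
--     return major_mask, majors, lengths, seed_mask, seeds
-- ===== Notes on version B (the rewrite author's own statement) =====
-- stated objective: alternative
-- what changed: B first run-length-compresses the events into (value, length, start) runs via itertools.groupby and drives the bout state machine one run per step (the first event of a True-run opens and seeds a new bout, the remaining events extend it and can promote it to major; a False-run longer than DBE closes the bout), then builds the boolean masks by directly marking the collected positions instead of A's per-index membership scans.
import Mathlib
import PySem

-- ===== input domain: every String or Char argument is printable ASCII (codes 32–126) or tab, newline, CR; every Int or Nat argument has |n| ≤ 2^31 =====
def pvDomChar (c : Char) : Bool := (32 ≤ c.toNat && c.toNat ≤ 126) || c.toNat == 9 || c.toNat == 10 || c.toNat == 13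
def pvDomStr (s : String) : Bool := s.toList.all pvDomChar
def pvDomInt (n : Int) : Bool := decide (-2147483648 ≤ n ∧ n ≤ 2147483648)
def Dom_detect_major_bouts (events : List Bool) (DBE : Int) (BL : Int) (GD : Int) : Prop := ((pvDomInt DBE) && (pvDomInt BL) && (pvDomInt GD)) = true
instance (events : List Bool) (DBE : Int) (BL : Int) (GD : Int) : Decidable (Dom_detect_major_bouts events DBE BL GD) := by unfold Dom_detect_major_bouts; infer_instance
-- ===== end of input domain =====

-- B re-implements A by run-length-compressing the events and driving the bout state machine
-- one run at a time instead of one sample at a time; same return value, no speed claim.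

-- ===== PORT A =====
-- loop state of A: major positions, major lengths, seed positions, the two flags,
-- potential-event position, distance counter, cumulative count
structure StA where
  mp : List Int
  ml : List Int
  sp : List Int
  nb : Bool
  nm : Bool
  pp : Int
  d  : Int
  c  : Int
deriving Repr, DecidableEq

def stepA (n : Nat) (DBE BL GD : Int) (st : StA) (pe : Int × Bool) : StA :=
  if pe.2 then
    let c := st.c + 1
    if !st.nb then
      { st with c := c, nb := true, pp := pe.1, sp := st.sp ++ [pe.1] }
    else
      let st1 := { st with c := c, d := 0 }
      if c ≥ BL then
        if st1.pp - GD > 0 ∧ st1.pp + GD < (n : Int) then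
          if !st1.nm then { st1 with nm := true, mp := st1.mp ++ [st1.pp] } else st1
        else st1
      else st1
  else
    if st.nb then
      if st.d < DBE then { st with d := st.d + 1 }
      else
        if st.nm then { st with ml := st.ml ++ [st.c], d := 0, nb := false, nm := false, c := 0 }
        else { st with d := 0, nb := false, nm := false, c := 0 }
    else st

def detect_major_bouts (events : List Bool) (DBE : Int) (BL : Int) (GD : Int) : List Bool × List Int × List Int × List Bool × List Int :=
  let n := events.length
  let st := (PySem.List.enumerate events 0).foldl (stepA n DBE BL GD) ⟨[], [], [], false, false, 0, 0, 0⟩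
  let major_events := (PySem.List.enumerate events 0).map (fun pe => st.mp.contains pe.1)
  let seeds_events := (PySem.List.enumerate events 0).map (fun pe => st.sp.contains pe.1)
  (major_events, st.mp, st.ml, seeds_events, st.sp)

-- ===== PORT B =====
-- run-length compression: list of (value, length, start index), as Source B's groupby loop builds it
def pyRuns : List Bool → Nat → List (Bool × Nat × Nat)
  | [], _ => []
  | v :: rest, i =>
    let k := (rest.takeWhile (· == v)).length + 1
    (v, k, i) :: pyRuns (rest.dropWhile (· == v)) (i + k)
termination_by l _ => l.length
decreasing_by
  simp only [List.length_cons]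
  exact Nat.lt_succ_of_le (List.length_dropWhile_le _ _)

-- loop state of B
structure StB where
  mp : List Nat
  ml : List Int
  sp : List Nat
  op : Bool
  nm : Bool
  c  : Int
  pp : Nat
deriving Repr, DecidableEq

def stepB (n : Nat) (DBE BL GD : Int) (st : StB) (r : Bool × Nat × Nat) : StB :=
  if r.1 then
    -- the first event of a new bout only opens and seeds it; the rest of the run extends it
    let p : StB × Nat :=
      if !st.op then
        ({ st with op := true, pp := r.2.2, sp := st.sp ++ [r.2.2], c := 1 }, r.2.1 - 1)
      else (st, r.2.1)
    let st1 := p.1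
    let k := p.2
    if k ≠ 0 then
      let c := st1.c + (k : Int)
      let st2 := { st1 with c := c }
      if !st2.nm ∧ c ≥ BL ∧ 0 < (st2.pp : Int) - GD ∧ (st2.pp : Int) + GD < (n : Int) then
        { st2 with nm := true, mp := st2.mp ++ [st2.pp] }
      else st2
    else st1
  else
    if st.op ∧ (r.2.1 : Int) > DBE then
      { st with ml := if st.nm then st.ml ++ [st.c] else st.ml, op := false, nm := false, c := 0 }
    else st

-- [False]*n then marking the collected positions, as Source B does
def pvMark (n : Nat) (ps : List Nat) : List Bool :=
  ps.foldl (fun m p => m.set p true) (List.replicate n false)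

def detect_major_bouts_alt (events : List Bool) (DBE : Int) (BL : Int) (GD : Int) : List Bool × List Int × List Int × List Bool × List Int :=
  let n := events.length
  let st := (pyRuns events 0).foldl (stepB n DBE BL GD) ⟨[], [], [], false, false, 0, 0⟩
  (pvMark n st.mp, st.mp.map (fun p => (p : Int)), st.ml, pvMark n st.sp, st.sp.map (fun p => (p : Int)))

-- ===== PRECONDITION & SPEC =====
def Spec_detect_major_bouts (events : List Bool) (DBE : Int) (BL : Int) (GD : Int) (out : List Bool × List Int × List Int × List Bool × List Int) : Prop := out = detect_major_bouts_alt events DBE BL GD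
instance (events : List Bool) (DBE : Int) (BL : Int) (GD : Int) (out : List Bool × List Int × List Int × List Bool × List Int) : Decidable (Spec_detect_major_bouts events DBE BL GD out) := by unfold Spec_detect_major_bouts; infer_instance

-- ===== CLAIM (what is proved, stated in full; the proofs are below) =====
def Claim_equal_detect_major_bouts : Prop := ∀ (events : List Bool) (DBE : Int) (BL : Int) (GD : Int), Dom_detect_major_bouts events DBE BL GD → Spec_detect_major_bouts events DBE BL GD (detect_major_bouts events DBE BL GD)

-- ===== LEMMAS AND PROOFS =====

-- A's state after closing a bout on a long-enough gap
def closeA (a : StA) : StA :=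
  { a with ml := if a.nm then a.ml ++ [a.c] else a.ml, d := 0, nb := false, nm := false, c := 0 }

-- did this True-run (raising the count to cNew) flag a major bout?
def hitT (n : Nat) (BL GD : Int) (a : StA) (cNew : Int) : Bool :=
  !a.nm && decide (cNew ≥ BL) && decide (a.pp - GD > 0 ∧ a.pp + GD < (n : Int))

-- A's state after k further True events inside an open bout
def openT (n : Nat) (BL GD : Int) (a : StA) (k : Nat) : StA :=
  if k = 0 then a else
  let cNew : Int := a.c + (k : Int)
  let h := hitT n BL GD a cNew
  { a with
    c := cNew
    d := 0
    nm := a.nm || h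
    mp := if h then a.mp ++ [a.pp] else a.mp }

-- state correspondence at run boundaries
def Corr (a : StA) (b : StB) : Prop :=
  a.mp = b.mp.map (fun p => (p : Int)) ∧ a.sp = b.sp.map (fun p => (p : Int)) ∧ a.ml = b.ml ∧
  a.nb = b.op ∧ a.nm = b.nm ∧ a.c = b.c ∧
  (b.op = true → a.pp = (b.pp : Int)) ∧ (b.op = false → a.nm = false ∧ a.c = 0)

theorem enum_repl_succ (v : Bool) (k : Nat) (i : Int) :
    PySem.List.enumerate (List.replicate (k + 1) v) i =
      (i, v) :: PySem.List.enumerate (List.replicate k v) (i + 1) := by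
  rw [List.replicate_succ, PySem.List.enumerate_cons]

theorem mem_enum_repl (v : Bool) (k : Nat) (i : Int) (p : Int × Bool)
    (hp : p ∈ PySem.List.enumerate (List.replicate k v) i) : p.2 = v := by
  rcases (PySem.List.mem_enumerate_iff _ _ _).mp hp with ⟨j, hj, rfl⟩
  simp

theorem foldA_closed (n : Nat) (DBE BL GD : Int) (a : StA) (ha : a.nb = false) :
    ∀ (ps : List (Int × Bool)), (∀ p ∈ ps, p.2 = false) →
    ps.foldl (stepA n DBE BL GD) a = a := by
  intro ps
  induction ps with
  | nil => intro _; rfl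
  | cons p ps ih =>
    intro hps
    have h2 : p.2 = false := hps p (by simp)
    have hstep : stepA n DBE BL GD a p = a := by
      simp [stepA, h2, ha]
    simp only [List.foldl_cons, hstep]
    exact ih (fun q hq => hps q (List.mem_cons_of_mem _ hq))

theorem stepA_false_close (n : Nat) (DBE BL GD : Int) (i : Int) (a : StA)
    (ha : a.nb = true) (hlt : ¬ a.d < DBE) :
    stepA n DBE BL GD a (i, false) = closeA a := by
  by_cases hnm : a.nm <;> simp [stepA, closeA, ha, hlt, hnm]

theorem foldA_false_open (n : Nat) (DBE BL GD : Int) :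
    ∀ (k : Nat) (i : Int) (a : StA), a.nb = true → a.d ≤ DBE →
    (PySem.List.enumerate (List.replicate k false) i).foldl (stepA n DBE BL GD) a =
      if (k : Int) ≤ DBE - a.d then { a with d := a.d + (k : Int) } else closeA a := by
  intro k
  induction k with
  | zero =>
    intro i a ha hd
    rw [if_pos (by omega)]
    simp only [List.replicate_zero, PySem.List.enumerate_nil, List.foldl_nil]
    cases a
    simp
  | succ k ih =>
    intro i a ha hd
    rw [enum_repl_succ]
    simp only [List.foldl_cons]
    by_cases hlt : a.d < DBE
    · have hstep : stepA n DBE BL GD a (i, false) = { a with d := a.d + 1 } := by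
        simp [stepA, ha, hlt]
      rw [hstep, ih (i + 1) _ (by simp [ha]) (by simp; omega)]
      by_cases hk : ((k : Int) + 1) ≤ DBE - a.d
      · rw [if_pos (by simp; omega), if_pos (by push_cast; omega)]
        simp only [StA.mk.injEq, and_true, true_and]
        push_cast
        ring
      · rw [if_neg (by simp; omega), if_neg (by push_cast; omega)]
        rfl
    · rw [stepA_false_close n DBE BL GD i a ha hlt]
      rw [foldA_closed n DBE BL GD (closeA a) (by simp [closeA]) _
        (fun q hq => mem_enum_repl false k (i + 1) q hq)]
      rw [if_neg (by push_cast; omega)]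

theorem foldA_false_open0 (n : Nat) (DBE BL GD : Int) (k : Nat) (i : Int) (a : StA)
    (ha : a.nb = true) (hd : a.d = 0) (hk : 1 ≤ k) :
    (PySem.List.enumerate (List.replicate k false) i).foldl (stepA n DBE BL GD) a =
      if (k : Int) ≤ max DBE 0 then { a with d := (k : Int) } else closeA a := by
  by_cases hDBE : 0 ≤ DBE
  · rw [foldA_false_open n DBE BL GD k i a ha (by omega)]
    rw [hd]
    by_cases hk2 : (k : Int) ≤ DBE
    · rw [if_pos (by omega), if_pos (by omega)]
      simp
    · rw [if_neg (by omega), if_neg (by omega)]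
  · obtain ⟨k', rfl⟩ : ∃ k', k = k' + 1 := ⟨k - 1, by omega⟩
    rw [enum_repl_succ]
    simp only [List.foldl_cons]
    rw [stepA_false_close n DBE BL GD i a ha (by omega)]
    rw [foldA_closed n DBE BL GD (closeA a) (by simp [closeA]) _
      (fun q hq => mem_enum_repl false k' (i + 1) q hq)]
    rw [if_neg (by push_cast; omega)]

theorem openT_nb (n : Nat) (BL GD : Int) (a : StA) (k : Nat) :
    (openT n BL GD a k).nb = a.nb := by
  unfold openT
  split <;> simp

theorem stepA_true_open (n : Nat) (DBE BL GD : Int) (i : Int) (a : StA)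
    (ha : a.nb = true) :
    stepA n DBE BL GD a (i, true) = openT n BL GD a 1 := by
  cases a with
  | mk mp ml sp nb nm pp d c =>
    subst ha
    by_cases hnm : nm = true
    · by_cases hBL : BL ≤ c + 1 <;> simp [stepA, openT, hitT, hnm, hBL]
    · by_cases hg1 : GD < pp
      · by_cases hg2 : pp + GD < (n : Int)
        · by_cases hBL : BL ≤ c + 1 <;> simp [stepA, openT, hitT, hnm, hg1, hg2, hBL]
        · by_cases hBL : BL ≤ c + 1 <;> simp [stepA, openT, hitT, hnm, hg2, hBL]
      · by_cases hBL : BL ≤ c + 1 <;> simp [stepA, openT, hitT, hnm, hg1, hBL]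

theorem openT_openT (n : Nat) (BL GD : Int) (a : StA) (k : Nat) :
    openT n BL GD (openT n BL GD a 1) k = openT n BL GD a (k + 1) := by
  by_cases hk : k = 0
  · subst hk
    simp [openT]
  · cases a with
    | mk mp ml sp nb nm pp d c =>
      have hc : c + (1 : Int) + (k : Int) = c + ((k + 1 : Nat) : Int) := by push_cast; ring
      by_cases hnm : nm = true
      · simp [openT, hitT, hk, hnm, hc]
      · by_cases hg1 : GD < pp
        · by_cases hg2 : pp + GD < (n : Int)
          · by_cases hBL1 : BL ≤ c + 1
            · have hBLk : BL ≤ c + ((k : Int) + 1) := by omega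
              simp [openT, hitT, hk, hnm, hg1, hg2, hBL1, hBLk, hc]
            · simp [openT, hitT, hk, hnm, hg1, hg2, hBL1, hc]
          · simp [openT, hitT, hk, hnm, hg2, hc]
        · simp [openT, hitT, hk, hnm, hg1, hc]

theorem foldA_true_open (n : Nat) (DBE BL GD : Int) :
    ∀ (k : Nat) (i : Int) (a : StA), a.nb = true →
    (PySem.List.enumerate (List.replicate k true) i).foldl (stepA n DBE BL GD) a =
      openT n BL GD a k := by
  intro k
  induction k with
  | zero =>
    intro i a ha
    simp [openT, PySem.List.enumerate_nil]
  | succ k ih =>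
    intro i a ha
    rw [enum_repl_succ]
    simp only [List.foldl_cons]
    rw [stepA_true_open n DBE BL GD i a ha,
        ih (i + 1) _ (by rw [openT_nb]; exact ha), openT_openT]

theorem trueRun (n : Nat) (DBE BL GD : Int) (k i : Nat) (a : StA) (b : StB)
    (hC : Corr a b) (hd : a.d = 0 ∨ b.op = true) (hk : 1 ≤ k) :
    Corr ((PySem.List.enumerate (List.replicate k true) (i : Int)).foldl (stepA n DBE BL GD) a)
      (stepB n DBE BL GD b (true, k, i)) ∧
    ((PySem.List.enumerate (List.replicate k true) (i : Int)).foldl (stepA n DBE BL GD) a).d = 0 := by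
  obtain ⟨hmp, hsp, hml, hnb, hnm, hc, hop, hcl⟩ := hC
  by_cases hob : b.op = true
  · -- bout already open: the whole run is non-opening Trues
    have ha : a.nb = true := by rw [hnb, hob]
    have hpp := hop hob
    rw [foldA_true_open n DBE BL GD k (i : Int) a ha]
    have hk0 : ¬ k = 0 := by omega
    constructor
    · by_cases hnm' : b.nm = true
      · have hnma : a.nm = true := by rw [hnm, hnm']
        simp [openT, hitT, stepB, Corr, hk0, hob, hnm', hnma, hpp, hc, hnb, hnm, hmp, hsp, hml]
      · have hnma : a.nm = false := by rw [hnm]; simpa using hnm'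
        by_cases hBL : BL ≤ b.c + (k : Int)
        · by_cases hg1 : GD < (b.pp : Int)
          · by_cases hg2 : (b.pp : Int) + GD < (n : Int)
            · simp [openT, hitT, stepB, Corr, hk0, hob, hnm', hnma, hpp, hc, hnb, hnm, hmp,
                hsp, hml, hBL, hg1, hg2]
            · simp [openT, hitT, stepB, Corr, hk0, hob, hnm', hnma, hpp, hc, hnb, hnm, hmp,
                hsp, hml, hBL, hg2]
          · simp [openT, hitT, stepB, Corr, hk0, hob, hnm', hnma, hpp, hc, hnb, hnm, hmp,
              hsp, hml, hBL, hg1]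
        · simp [openT, hitT, stepB, Corr, hk0, hob, hnm', hnma, hpp, hc, hnb, hnm, hmp,
            hsp, hml, hBL]
    · simp [openT, hk0]
  · -- bout not open: the first True of the run opens it, the rest extend it
    have hob' : b.op = false := by simpa using hob
    have ha : a.nb = false := by rw [hnb, hob']
    obtain ⟨hnma, hca⟩ := hcl hob'
    have hnmb : b.nm = false := by rw [← hnm, hnma]
    have hcb : b.c = 0 := by rw [← hc, hca]
    have hda : a.d = 0 := by
      rcases hd with h | h
      · exact h
      · exact absurd h hob
    obtain ⟨k', rfl⟩ : ∃ k', k = k' + 1 := ⟨k - 1, by omega⟩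
    rw [enum_repl_succ]
    simp only [List.foldl_cons]
    have hstep : stepA n DBE BL GD a ((i : Int), true) =
        { a with c := a.c + 1, nb := true, pp := (i : Int), sp := a.sp ++ [(i : Int)] } := by
      simp [stepA, ha]
    rw [hstep, foldA_true_open n DBE BL GD k' _ _ (by simp)]
    by_cases hk0 : k' = 0
    · subst hk0
      constructor
      · simp [openT, stepB, Corr, hob', hnma, hnmb, hnm, hc, hca, hcb, hmp, hsp, hml]
      · simp [openT, hda]
    · constructor
      · by_cases hBL : BL ≤ a.c + 1 + (k' : Int)
        · have hBLb : BL ≤ 1 + (k' : Int) := by omega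
          by_cases hg1 : GD < (i : Int)
          · by_cases hg2 : (i : Int) + GD < (n : Int)
            · simp [openT, hitT, stepB, Corr, hk0, hob', hnma, hnmb, hnm, hca, hcb, hmp,
                hsp, hml, hBL, hBLb, hg1, hg2]
            · simp [openT, hitT, stepB, Corr, hk0, hob', hnma, hnmb, hnm, hca, hcb, hmp,
                hsp, hml, hg2]
          · simp [openT, hitT, stepB, Corr, hk0, hob', hnma, hnmb, hnm, hca, hcb, hmp,
              hsp, hml, hg1]
        · have hBLb : ¬ BL ≤ 1 + (k' : Int) := by omega
          simp [openT, hitT, stepB, Corr, hk0, hob', hnma, hnmb, hnm, hca, hcb, hmp, hsp,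
            hml, hBL, hBLb]
      · simp [openT, hk0]

theorem falseRun (n : Nat) (DBE BL GD : Int) (k i : Nat) (a : StA) (b : StB)
    (hC : Corr a b) (hd : a.d = 0) (hk : 1 ≤ k) :
    Corr ((PySem.List.enumerate (List.replicate k false) (i : Int)).foldl (stepA n DBE BL GD) a)
      (stepB n DBE BL GD b (false, k, i)) ∧
    (((PySem.List.enumerate (List.replicate k false) (i : Int)).foldl (stepA n DBE BL GD) a).d = 0 ∨
      (stepB n DBE BL GD b (false, k, i)).op = true) := by
  obtain ⟨hmp, hsp, hml, hnb, hnm, hc, hop, hcl⟩ := hC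
  by_cases hob : b.op = true
  · -- open bout: the gap either stays within tolerance or closes the bout
    have ha : a.nb = true := by rw [hnb, hob]
    rw [foldA_false_open0 n DBE BL GD k (i : Int) a ha hd hk]
    by_cases hkt : (k : Int) ≤ max DBE 0
    · rw [if_pos hkt]
      have hB : stepB n DBE BL GD b (false, k, i) = b := by
        have hgt : ¬ ((k : Int) > DBE) := by omega
        simp [stepB, hgt]
      rw [hB]
      constructor
      · exact ⟨hmp, hsp, hml, hnb, hnm, hc, hop, hcl⟩
      · right; exact hob
    · rw [if_neg hkt]
      have hB : stepB n DBE BL GD b (false, k, i) =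
          { b with
            ml := if b.nm then b.ml ++ [b.c] else b.ml
            op := false
            nm := false
            c := 0 } := by
        have hgt : ((k : Int) > DBE) := by omega
        simp [stepB, hob, hgt]
      rw [hB]
      constructor
      · refine ⟨hmp, hsp, ?_, rfl, rfl, rfl, ?_, fun _ => ⟨rfl, rfl⟩⟩
        · simp [closeA, hml, hnm, hc]
        · intro h; simp at h
      · left; simp [closeA]
  · -- no open bout: both sides ignore the False run
    have hob' : b.op = false := by simpa using hob
    have ha : a.nb = false := by rw [hnb, hob']
    rw [foldA_closed n DBE BL GD a ha _ (fun q hq => mem_enum_repl false k _ q hq)]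
    have hB : stepB n DBE BL GD b (false, k, i) = b := by
      simp [stepB, hob']
    rw [hB]
    exact ⟨⟨hmp, hsp, hml, hnb, hnm, hc, hop, hcl⟩, Or.inl hd⟩

theorem run_decomp (v : Bool) (rest : List Bool) :
    v :: rest = List.replicate ((rest.takeWhile (· == v)).length + 1) v ++ rest.dropWhile (· == v) := by
  have h : rest.takeWhile (· == v) = List.replicate (rest.takeWhile (· == v)).length v :=
    List.eq_replicate_of_mem (fun b hb => by
      have := List.mem_takeWhile_imp hb
      simpa using this)
  rw [List.replicate_succ]
  conv_lhs => rw [← List.takeWhile_append_dropWhile (p := (· == v)) (l := rest)]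
  rw [List.cons_append]
  rw [← h]

theorem head_dropWhile (v : Bool) :
    ∀ (rest : List Bool) (x : Bool), (rest.dropWhile (· == v)).head? = some x → x ≠ v := by
  intro rest
  induction rest with
  | nil => intro x hx; simp [List.dropWhile] at hx
  | cons b t ih =>
    intro x hx
    rw [List.dropWhile_cons] at hx
    by_cases hb : (b == v) = true
    · rw [if_pos hb] at hx
      exact ih x hx
    · rw [if_neg hb] at hx
      simp only [List.head?_cons, Option.some.injEq] at hx
      subst hx
      simpa using hb

theorem mainL (n : Nat) (DBE BL GD : Int) (m : Nat) :
    ∀ (l : List Bool), l.length ≤ m → ∀ (i : Nat) (a : StA) (b : StB), Corr a b →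
      (a.d = 0 ∨ (b.op = true ∧ l.head? ≠ some false)) →
      Corr ((PySem.List.enumerate l (i : Int)).foldl (stepA n DBE BL GD) a)
        ((pyRuns l i).foldl (stepB n DBE BL GD) b) := by
  induction m with
  | zero =>
    intro l hl i a b hC hH
    have : l = [] := List.eq_nil_of_length_eq_zero (by omega)
    subst this
    simpa [pyRuns, PySem.List.enumerate_nil] using hC
  | succ m ih =>
    intro l hl i a b hC hH
    cases l with
    | nil => simpa [pyRuns, PySem.List.enumerate_nil] using hC
    | cons v rest =>
      have hdec := run_decomp v rest
      have hlen' : (rest.dropWhile (· == v)).length ≤ m := by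
        have h1 := List.length_dropWhile_le (p := (· == v)) (l := rest)
        simp only [List.length_cons] at hl
        omega
      rw [pyRuns]
      simp only [List.foldl_cons]
      conv_lhs => rw [hdec]
      rw [PySem.List.enumerate_append, List.foldl_append, List.length_replicate]
      have hcast : (i : Int) + (((rest.takeWhile (· == v)).length + 1 : Nat) : Int) =
          ((i + ((rest.takeWhile (· == v)).length + 1) : Nat) : Int) := by push_cast; ring
      rw [hcast]
      cases v with
      | true =>
        obtain ⟨hC1, hd1⟩ := trueRun n DBE BL GD ((rest.takeWhile (· == true)).length + 1) i a b
          hC (by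
            rcases hH with h | ⟨h, _⟩
            · exact Or.inl h
            · exact Or.inr h) (by omega)
        exact ih _ hlen' _ _ _ hC1 (Or.inl hd1)
      | false =>
        have hd0 : a.d = 0 := by
          rcases hH with h | ⟨_, hh⟩
          · exact h
          · exact absurd rfl hh
        obtain ⟨hC1, hd1⟩ := falseRun n DBE BL GD ((rest.takeWhile (· == false)).length + 1) i a b
          hC hd0 (by omega)
        refine ih _ hlen' _ _ _ hC1 ?_
        rcases hd1 with h | h
        · exact Or.inl h
        · refine Or.inr ⟨h, fun heq => ?_⟩
          exact head_dropWhile false rest false heq rfl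

theorem foldl_set_length (ps : List Nat) : ∀ (m : List Bool),
    (ps.foldl (fun m p => m.set p true) m).length = m.length := by
  induction ps with
  | nil => intro m; rfl
  | cons p ps ih =>
    intro m
    simp only [List.foldl_cons]
    rw [ih, List.length_set]

theorem foldl_set_getElem (ps : List Nat) : ∀ (m : List Bool) (j : Nat) (hj : j < m.length)
    (hj' : j < (ps.foldl (fun m p => m.set p true) m).length),
    (ps.foldl (fun m p => m.set p true) m)[j] = (m[j] || ps.contains j) := by
  induction ps with
  | nil => intro m j hj hj'; simp
  | cons p ps ih =>
    intro m j hj hj'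
    simp only [List.foldl_cons] at hj' ⊢
    rw [ih (m.set p true) j (by rw [List.length_set]; exact hj) hj']
    rw [List.getElem_set]
    by_cases hpj : p = j
    · subst hpj
      simp
    · simp only [if_neg hpj, List.contains_cons]
      have : (j == p) = false := by simpa using fun h => hpj h.symm
      rw [this]
      simp

theorem maskEq (events : List Bool) (ps : List Nat) :
    (PySem.List.enumerate events 0).map (fun pe => (ps.map (fun p => (p : Int))).contains pe.1) =
      pvMark events.length ps := by
  apply List.ext_getElem
  · rw [List.length_map, PySem.List.length_enumerate, pvMark, foldl_set_length,
      List.length_replicate]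
  · intro j h1 h2
    have hj : j < events.length := by
      rw [List.length_map, PySem.List.length_enumerate] at h1
      exact h1
    rw [List.getElem_map, PySem.List.getElem_enumerate]
    simp only [pvMark]
    rw [foldl_set_getElem ps _ j (by simpa using hj)
      (by rw [foldl_set_length, List.length_replicate]; exact hj)]
    rw [List.getElem_replicate]
    simp

-- ===== VERDICT (by name: the statement is the Claim_ definition above) =====
theorem detect_major_bouts_spec : Claim_equal_detect_major_bouts := by
  unfold Claim_equal_detect_major_bouts
  intro events DBE BL GD _
  unfold Spec_detect_major_bouts
  have hmain := mainL events.length DBE BL GD events.length events (le_refl _) 0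
    ⟨[], [], [], false, false, 0, 0, 0⟩ ⟨[], [], [], false, false, 0, 0⟩
    (by simp [Corr]) (Or.inl rfl)
  simp only [Nat.cast_zero] at hmain
  obtain ⟨hmp, hsp, hml, _, _, _, _, _⟩ := hmain
  simp only [detect_major_bouts, detect_major_bouts_alt, Prod.mk.injEq]
  refine ⟨?_, hmp, hml, ?_, hsp⟩
  · rw [hmp, maskEq]
  · rw [hsp, maskEq]
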